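-- pv_equiv track=rewrite | github.com/KampfFlummix/NexusAI | NEXUS-AI_Portable/security_core.py | _calculate_overall_risk
-- ===== SOURCE A (Python) =====
-- def _calculate_overall_risk(scan_results):
--     """Calculate overall risk level based on findings"""
--     vulnerabilities = scan_results['static_analysis']
--
--     if any(vuln['severity'] == 'CRITICAL' for vuln in vulnerabilities):
--         return 'CRITICAL'
--     elif any(vuln['severity'] == 'HIGH' for vuln in vulnerabilities):
--         return 'HIGH'
--     elif any(vuln['severity'] == 'MEDIUM' for vuln in vulnerabilities):
--         return 'MEDIUM'
--     else:
--         return 'LOW'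
-- ===== SOURCE B (Python) =====
-- def _calculate_overall_risk(scan_results):
--     """Calculate overall risk level based on findings"""
--     best = 0
--     for vuln in scan_results['static_analysis']:
--         sev = vuln['severity']
--         if sev == 'CRITICAL':
--             return 'CRITICAL'
--         best = max(best, 2 if sev == 'HIGH' else (1 if sev == 'MEDIUM' else 0))
--     if best == 2:
--         return 'HIGH'
--     if best == 1:
--         return 'MEDIUM'
--     return 'LOW'
-- ===== Notes on version B (the rewrite author's own statement) =====
-- stated objective: simpler
-- what changed: Replaced A's three ordered any()-scans over the vulnerability list by a single traversal that returns 'CRITICAL' immediately and otherwise tracks the maximum severity rank, mapped to a level after the loop.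
import Mathlib
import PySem

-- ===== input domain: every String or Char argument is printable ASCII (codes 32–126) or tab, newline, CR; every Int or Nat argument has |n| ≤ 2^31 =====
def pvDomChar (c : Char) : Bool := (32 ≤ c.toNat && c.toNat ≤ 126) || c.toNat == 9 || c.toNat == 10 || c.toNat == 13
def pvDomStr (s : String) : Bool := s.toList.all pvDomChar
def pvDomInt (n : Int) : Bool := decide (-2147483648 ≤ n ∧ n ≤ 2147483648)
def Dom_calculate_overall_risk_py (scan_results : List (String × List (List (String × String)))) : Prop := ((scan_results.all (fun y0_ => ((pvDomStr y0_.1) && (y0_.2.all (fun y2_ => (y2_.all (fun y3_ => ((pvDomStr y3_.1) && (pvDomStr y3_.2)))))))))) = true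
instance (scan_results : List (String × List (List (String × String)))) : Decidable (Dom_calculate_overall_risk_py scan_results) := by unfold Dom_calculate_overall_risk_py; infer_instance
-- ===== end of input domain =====

-- B replaces A's three ordered any()-scans by one max-tracking pass with an early CRITICAL return (simpler, single traversal).
-- Equivalence is on return values; neither program mutates its argument.

-- ===== PORT A =====
-- first-match association lookup (Python dict access; none = KeyError)
def pvLookupA {α : Type} (d : List (String × α)) (k : String) : Option α :=
  match d with
  | [] => none
  | (a, b) :: r => if a = k then some b else pvLookupA r k

-- any(vuln['severity'] == t for vuln in vulns): none models a KeyError raised during the scan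
def pvAnySev (vulns : List (List (String × String))) (t : String) : Option Bool :=
  match vulns with
  | [] => some false
  | v :: r =>
    match pvLookupA v "severity" with
    | none => none
    | some s => if s = t then some true else pvAnySev r t

def calculate_overall_risk_py (scan_results : List (String × List (List (String × String)))) : String :=
  match pvLookupA scan_results "static_analysis" with
  | none => ""          -- KeyError: excluded by Pre_
  | some vulns =>
    match pvAnySev vulns "CRITICAL" with
    | none => ""        -- KeyError: excluded by Pre_
    | some true => "CRITICAL"
    | some false =>
      match pvAnySev vulns "HIGH" with
      | some true => "HIGH"
      | _ =>
        match pvAnySev vulns "MEDIUM" with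
        | some true => "MEDIUM"
        | _ => "LOW"

-- ===== PORT B =====
def pvLookupB {α : Type} (d : List (String × α)) (k : String) : Option α :=
  match d with
  | [] => none
  | (a, b) :: r => if a = k then some b else pvLookupB r k

-- the single for-loop of Source B: early return on CRITICAL, otherwise keep the max rank
def pvGoB (vulns : List (List (String × String))) (best : Nat) : String :=
  match vulns with
  | [] => if best = 2 then "HIGH" else if best = 1 then "MEDIUM" else "LOW"
  | v :: r =>
    match pvLookupB v "severity" with
    | none => ""        -- KeyError: excluded by Pre_
    | some s =>
      if s = "CRITICAL" then "CRITICAL"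
      else pvGoB r (max best (if s = "HIGH" then 2 else if s = "MEDIUM" then 1 else 0))

def calculate_overall_risk_py_alt (scan_results : List (String × List (List (String × String)))) : String :=
  match pvLookupB scan_results "static_analysis" with
  | none => ""          -- KeyError: excluded by Pre_
  | some vulns => pvGoB vulns 0

-- ===== PRECONDITION & SPEC =====
-- severity of a vuln dict (first match), used only to state Pre_
def pvSev (v : List (String × String)) : Option String :=
  (v.find? (fun p => p.1 == "severity")).map Prod.snd

-- Pre_ excludes exactly the inputs where A raises KeyError: a missing 'static_analysis' key, or a
-- vuln without a 'severity' key that is not preceded by a CRITICAL vuln (both A and B raise there).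
def Pre_calculate_overall_risk_py (scan_results : List (String × List (List (String × String)))) : Prop :=
  (scan_results.find? (fun p => p.1 == "static_analysis")).isSome = true ∧
  (∀ i, (hi : i < (((scan_results.find? (fun p => p.1 == "static_analysis")).map Prod.snd).getD []).length) →
    pvSev ((((scan_results.find? (fun p => p.1 == "static_analysis")).map Prod.snd).getD [])[i]) = none →
    ∃ j, ∃ _hj : j < i,
      pvSev ((((scan_results.find? (fun p => p.1 == "static_analysis")).map Prod.snd).getD [])[j]'(by omega)) = some "CRITICAL")

instance (scan_results : List (String × List (List (String × String)))) : Decidable (Pre_calculate_overall_risk_py scan_results) := by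
  unfold Pre_calculate_overall_risk_py; infer_instance

def pvWitness_calculate_overall_risk_py : (List (String × List (List (String × String)))) :=
  [("static_analysis", [[("severity", "MEDIUM")]])]

def Spec_calculate_overall_risk_py (scan_results : List (String × List (List (String × String)))) (out : String) : Prop := out = calculate_overall_risk_py_alt scan_results
instance (scan_results : List (String × List (List (String × String)))) (out : String) : Decidable (Spec_calculate_overall_risk_py scan_results out) := by unfold Spec_calculate_overall_risk_py; infer_instance

-- ===== CLAIM (what is proved, stated in full; the proofs are below) =====
def Claim_equal_calculate_overall_risk_py : Prop := ∀ (scan_results : List (String × List (List (String × String)))), Dom_calculate_overall_risk_py scan_results → Pre_calculate_overall_risk_py scan_results → Spec_calculate_overall_risk_py scan_results (calculate_overall_risk_py scan_results)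

-- ===== LEMMAS AND PROOFS =====

theorem pvLookupA_eq_find {α : Type} (d : List (String × α)) (k : String) :
    pvLookupA d k = (d.find? (fun p => p.1 == k)).map Prod.snd := by
  induction d with
  | nil => rfl
  | cons p r ih =>
    obtain ⟨a, b⟩ := p
    by_cases h : a = k
    · subst h
      rw [List.find?_cons_of_pos (by simp)]
      simp [pvLookupA]
    · rw [List.find?_cons_of_neg (by simp [h])]
      simp [pvLookupA, h, ih]

theorem pvLookupB_eq_A {α : Type} (d : List (String × α)) (k : String) :
    pvLookupB d k = pvLookupA d k := by
  induction d with
  | nil => rfl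
  | cons p r ih => obtain ⟨a, b⟩ := p; simp only [pvLookupA, pvLookupB]; rw [ih]

theorem pvLookupA_sev (v : List (String × String)) : pvLookupA v "severity" = pvSev v := by
  rw [pvLookupA_eq_find]; rfl

-- if the first CRITICAL-scan succeeds with True, B's loop also returns "CRITICAL"
theorem goB_of_any_crit (vulns : List (List (String × String))) :
    ∀ best, pvAnySev vulns "CRITICAL" = some true → pvGoB vulns best = "CRITICAL" := by
  induction vulns with
  | nil => intro best h; simp [pvAnySev] at h
  | cons v r ih =>
    intro best h
    simp only [pvAnySev] at h
    simp only [pvGoB, pvLookupB_eq_A]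
    cases hs : pvLookupA v "severity" with
    | none => simp only [hs] at h; simp at h
    | some s =>
      simp only [hs] at h
      by_cases hc : s = "CRITICAL"
      · simp [hc]
      · rw [if_neg hc] at h
        simp [hc, ih _ h]

-- if the CRITICAL-scan raises, the first missing-severity vuln has no CRITICAL before it
theorem any_none (vulns : List (List (String × String))) (t : String) :
    pvAnySev vulns t = none →
    ∃ i, ∃ hi : i < vulns.length, pvSev vulns[i] = none ∧
      ∀ j, (hj : j < i) → pvSev (vulns[j]'(by omega)) ≠ some t := by
  induction vulns with
  | nil => intro h; simp [pvAnySev] at h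
  | cons v r ih =>
    intro h
    simp only [pvAnySev] at h
    cases hs : pvLookupA v "severity" with
    | none =>
      refine ⟨0, by simp, ?_, ?_⟩
      · rw [← pvLookupA_sev]; simpa using hs
      · intro j hj; omega
    | some s =>
      simp only [hs] at h
      by_cases hc : s = t
      · simp [hc] at h
      · rw [if_neg hc] at h
        obtain ⟨i, hi, hnone, hprev⟩ := ih h
        refine ⟨i + 1, by simpa using Nat.succ_lt_succ hi, by simpa using hnone, ?_⟩
        intro j hj
        cases j with
        | zero =>
          simp only [List.getElem_cons_zero]
          rw [← pvLookupA_sev, hs]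
          intro hbad
          exact hc (by injection hbad)
        | succ j' =>
          simpa using hprev j' (by omega)

-- if a scan completes with False, every vuln has a severity and none equals t
theorem any_false (vulns : List (List (String × String))) (t : String) :
    pvAnySev vulns t = some false →
    (∀ v ∈ vulns, (pvSev v).isSome) ∧
    vulns.any (fun v => (pvSev v).getD "" == t) = false := by
  induction vulns with
  | nil => intro _; simp
  | cons v r ih =>
    intro h
    simp only [pvAnySev] at h
    cases hs : pvLookupA v "severity" with
    | none => simp only [hs] at h; simp at h
    | some s =>
      simp only [hs] at h
      by_cases hc : s = t
      · simp [hc] at h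
      · rw [if_neg hc] at h
        obtain ⟨hall, hany⟩ := ih h
        rw [pvLookupA_sev] at hs
        refine ⟨?_, ?_⟩
        · intro w hw
          rcases List.mem_cons.mp hw with hw | hw
          · subst hw; simp [hs]
          · exact hall w hw
        · simp [List.any_cons, hany, hs, hc]

-- if a scan returns True, some vuln has severity t (needed to relate the HIGH/MEDIUM scans)
theorem any_true (vulns : List (List (String × String))) (t : String) :
    pvAnySev vulns t = some true →
    vulns.any (fun v => (pvSev v).getD "" == t) = true := by
  induction vulns with
  | nil => intro h; simp [pvAnySev] at h
  | cons v r ih =>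
    intro h
    simp only [pvAnySev] at h
    cases hs : pvLookupA v "severity" with
    | none => simp only [hs] at h; simp at h
    | some s =>
      simp only [hs] at h
      rw [pvLookupA_sev] at hs
      by_cases hc : s = t
      · subst hc; simp [hs]
      · rw [if_neg hc] at h
        simp [ih h]

-- B's loop, when every vuln has a severity and none is CRITICAL, computes the max-rank level
theorem goB_no_crit (vulns : List (List (String × String))) :
    ∀ best, best ≤ 2 →
    (∀ v ∈ vulns, (pvSev v).isSome) →
    vulns.any (fun v => (pvSev v).getD "" == "CRITICAL") = false →
    pvGoB vulns best =
      (if vulns.any (fun v => (pvSev v).getD "" == "HIGH") || decide (best = 2) then "HIGH"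
       else if vulns.any (fun v => (pvSev v).getD "" == "MEDIUM") || decide (best = 1) then "MEDIUM"
       else "LOW") := by
  induction vulns with
  | nil =>
    intro best _ _ _
    simp only [pvGoB, List.any_nil, Bool.false_or]
    split_ifs with h1 h2 <;> simp_all
  | cons v r ih =>
    intro best hb hall hcrit
    simp only [List.any_cons, Bool.or_eq_false_iff] at hcrit
    obtain ⟨hvc, hrc⟩ := hcrit
    have hv : (pvSev v).isSome := hall v (by simp)
    obtain ⟨s, hs⟩ := Option.isSome_iff_exists.mp hv
    simp only [pvGoB, pvLookupB_eq_A, pvLookupA_sev, hs]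
    have hsc : s ≠ "CRITICAL" := by
      intro h; rw [hs, h] at hvc; simp at hvc
    rw [if_neg hsc]
    rw [ih _ (by split_ifs <;> omega) (fun w hw => hall w (by simp [hw])) hrc]
    simp only [List.any_cons, hs, Option.getD_some]
    by_cases hH : s = "HIGH"
    · simp [hH, show max best 2 = 2 by omega]
    · by_cases hM : s = "MEDIUM"
      · by_cases h2 : best = 2
        · simp [hM, h2]
        · simp [hM, h2, show max best 1 = 1 by omega]
      · simp [hH, hM]

-- ===== VERDICT (by name: the statement is the Claim_ definition above) =====
theorem calculate_overall_risk_py_spec : Claim_equal_calculate_overall_risk_py := by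
  intro sc _dom hpre
  obtain ⟨hkey, hprev⟩ := hpre
  unfold Spec_calculate_overall_risk_py calculate_overall_risk_py calculate_overall_risk_py_alt
  rw [pvLookupB_eq_A, pvLookupA_eq_find]
  cases hfind : sc.find? (fun p => p.1 == "static_analysis") with
  | none => rw [hfind] at hkey; simp at hkey
  | some pr =>
    obtain ⟨k, vulns⟩ := pr
    simp only [hfind, Option.map_some, Option.getD_some] at hprev ⊢
    cases hc : pvAnySev vulns "CRITICAL" with
    | none =>
      exfalso
      obtain ⟨i, hi, hnone, hnoc⟩ := any_none vulns "CRITICAL" hc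
      obtain ⟨j, hj, hcj⟩ := hprev i hi hnone
      exact hnoc j hj hcj
    | some b =>
      cases b with
      | true => simp only [goB_of_any_crit vulns 0 hc]
      | false =>
        obtain ⟨hall, hcritfalse⟩ := any_false vulns "CRITICAL" hc
        rw [goB_no_crit vulns 0 (by omega) hall hcritfalse]
        cases hh : pvAnySev vulns "HIGH" with
        | none =>
          exfalso
          obtain ⟨i, hi, hnone, _⟩ := any_none vulns "HIGH" hh
          obtain ⟨s, hs⟩ := Option.isSome_iff_exists.mp (hall _ (List.getElem_mem hi))
          rw [hs] at hnone
          simp at hnone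
        | some bh =>
          cases bh with
          | true => simp [any_true vulns "HIGH" hh]
          | false =>
            obtain ⟨_, hhf⟩ := any_false vulns "HIGH" hh
            cases hm : pvAnySev vulns "MEDIUM" with
            | none =>
              exfalso
              obtain ⟨i, hi, hnone, _⟩ := any_none vulns "MEDIUM" hm
              obtain ⟨s, hs⟩ := Option.isSome_iff_exists.mp (hall _ (List.getElem_mem hi))
              rw [hs] at hnone
              simp at hnone
            | some bm =>
              cases bm with
              | true => simp [any_true vulns "MEDIUM" hm, hhf]
              | false =>
                obtain ⟨_, hmf⟩ := any_false vulns "MEDIUM" hm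
                simp [hhf, hmf]
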